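-- pv_equiv track=rewrite | github.com/manqiie/tripmate2 | tripmate_backend/trips/views.py | _group_places_by_stop
-- ===== SOURCE A (Python) =====
-- def _group_places_by_stop(places):
--     """Helper function to group places by stop"""
--     grouped = {}
--     for place in places:
--         stop_index = place['stop_index']
--         if stop_index not in grouped:
--             grouped[stop_index] = []
--         grouped[stop_index].append(place)
--     return grouped
-- ===== SOURCE B (Python) =====
-- def _group_places_by_stop(places):
--     """Group places by stop: collect distinct stop_index values in first-occurrence
--     order, then build each group with one filtering pass over places."""
--     keys = list(dict.fromkeys(place['stop_index'] for place in places))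
--     return {k: [place for place in places if place['stop_index'] == k] for k in keys}
-- ===== Notes on version B (the rewrite author's own statement) =====
-- stated objective: alternative
-- what changed: B replaces A's single scatter pass (mutating per-key lists in a dict) with a keys-then-filter decomposition: it first collects the distinct stop_index values in first-occurrence order, then builds each group by one filter pass over places.
import Mathlib
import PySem

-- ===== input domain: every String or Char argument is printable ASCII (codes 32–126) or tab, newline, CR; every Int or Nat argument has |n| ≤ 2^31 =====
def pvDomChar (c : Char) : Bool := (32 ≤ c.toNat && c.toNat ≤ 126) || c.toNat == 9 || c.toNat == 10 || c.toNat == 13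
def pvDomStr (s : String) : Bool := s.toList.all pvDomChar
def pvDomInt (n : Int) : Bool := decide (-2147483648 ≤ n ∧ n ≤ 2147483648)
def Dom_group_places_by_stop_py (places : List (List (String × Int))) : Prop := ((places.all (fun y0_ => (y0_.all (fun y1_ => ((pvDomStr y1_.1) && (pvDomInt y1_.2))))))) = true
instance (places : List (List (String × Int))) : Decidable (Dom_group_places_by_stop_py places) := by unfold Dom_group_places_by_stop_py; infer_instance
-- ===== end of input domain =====

-- B groups places by first collecting the distinct stop_index keys in first-occurrence
-- order and then filtering places once per key, instead of A's single scatter pass.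
-- Equivalence is proved on inputs where every place carries the 'stop_index' key (A raises KeyError otherwise).

-- ===== PORT A =====
-- place['stop_index']: first entry with key "stop_index" (Python dict lookup = first match);
-- the `none` branch is a KeyError in Python and is excluded by Pre_ below.
def stopIdxOf (place : List (String × Int)) : Int :=
  match place.find? (fun kv => kv.1 == "stop_index") with
  | some kv => kv.2
  | none => 0

-- grouped[k].append(place) / grouped[k] = [place]: update first matching entry in place, else append new key
def addPlace (g : List (Int × List (List (String × Int)))) (k : Int) (p : List (String × Int)) :
    List (Int × List (List (String × Int))) :=
  match g with
  | [] => [(k, [p])]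
  | (a, v) :: rest => if a = k then (a, v ++ [p]) :: rest else (a, v) :: addPlace rest k p

def group_places_by_stop_py (places : List (List (String × Int))) : List (Int × List (List (String × Int))) :=
  places.foldl (fun g place => addPlace g (stopIdxOf place) place) []

-- ===== PORT B =====
-- list(dict.fromkeys(...)): distinct keys in first-occurrence order
def distinctKeys (places : List (List (String × Int))) : List Int :=
  places.foldl (fun ks place => let k := stopIdxOf place; if k ∈ ks then ks else ks ++ [k]) []

def group_places_by_stop_py_alt (places : List (List (String × Int))) : List (Int × List (List (String × Int))) :=
  (distinctKeys places).map (fun k => (k, places.filter (fun place => stopIdxOf place = k)))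

-- ===== PRECONDITION & SPEC =====
-- Pre_ excludes exactly the inputs where some place lacks the 'stop_index' key, on which A raises KeyError.
def Pre_group_places_by_stop_py (places : List (List (String × Int))) : Prop :=
  ∀ place ∈ places, ∃ kv ∈ place, kv.1 = "stop_index"
instance (places : List (List (String × Int))) : Decidable (Pre_group_places_by_stop_py places) := by unfold Pre_group_places_by_stop_py; infer_instance
def pvWitness_group_places_by_stop_py : (List (List (String × Int))) := ([[("stop_index", 0), ("x", 1)], [("stop_index", 1)]])

def Spec_group_places_by_stop_py (places : List (List (String × Int))) (out : List (Int × List (List (String × Int)))) : Prop := out = group_places_by_stop_py_alt places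
instance (places : List (List (String × Int))) (out : List (Int × List (List (String × Int)))) : Decidable (Spec_group_places_by_stop_py places out) := by unfold Spec_group_places_by_stop_py; infer_instance

-- ===== CLAIM (what is proved, stated in full; the proofs are below) =====
def Claim_equal_group_places_by_stop_py : Prop := ∀ (places : List (List (String × Int))), Dom_group_places_by_stop_py places → Pre_group_places_by_stop_py places → Spec_group_places_by_stop_py places (group_places_by_stop_py places)

-- ===== LEMMAS AND PROOFS =====

-- first-match lookup, defaulting to []
def lookupD (g : List (Int × List (List (String × Int)))) (k : Int) : List (List (String × Int)) :=
  match g with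
  | [] => []
  | (a, v) :: rest => if a = k then v else lookupD rest k

-- keysFold ks places: distinctKeys continued from accumulator ks
def keysFold (ks : List Int) (places : List (List (String × Int))) : List Int :=
  places.foldl (fun ks place => let k := stopIdxOf place; if k ∈ ks then ks else ks ++ [k]) ks

theorem lookupD_addPlace (g : List (Int × List (List (String × Int)))) (k k' : Int) (p : List (String × Int)) :
    lookupD (addPlace g k p) k' = if k' = k then lookupD g k' ++ [p] else lookupD g k' := by
  induction g with
  | nil =>
    by_cases h : k' = k
    · simp [addPlace, lookupD, h]
    · simp only [addPlace, lookupD, if_neg h]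
      rw [if_neg (fun he : k = k' => h he.symm)]
  | cons hd tl ih =>
    obtain ⟨a, v⟩ := hd
    by_cases hak : a = k
    · subst hak
      by_cases h : k' = a <;> simp [addPlace, lookupD, h, Eq.comm]
    · by_cases h : a = k'
      · subst h
        simp [addPlace, lookupD, hak]
      · simp [addPlace, lookupD, hak, h, ih]

theorem keys_addPlace (g : List (Int × List (List (String × Int)))) (k : Int) (p : List (String × Int)) :
    (addPlace g k p).map Prod.fst = if k ∈ g.map Prod.fst then g.map Prod.fst else g.map Prod.fst ++ [k] := by
  induction g with
  | nil => simp [addPlace]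
  | cons hd tl ih =>
    obtain ⟨a, v⟩ := hd
    by_cases hak : a = k
    · subst hak; simp [addPlace]
    · by_cases hm : k ∈ tl.map Prod.fst <;>
        simp [addPlace, hak, ih, hm, Ne.symm hak]

theorem reconstruct (g : List (Int × List (List (String × Int)))) (h : (g.map Prod.fst).Nodup) :
    (g.map Prod.fst).map (fun k => (k, lookupD g k)) = g := by
  induction g with
  | nil => rfl
  | cons hd tl ih =>
    obtain ⟨a, v⟩ := hd
    simp only [List.map_cons, List.nodup_cons] at h
    simp only [List.map_cons]
    congr 1
    · simp [lookupD]
    · have hco : ∀ k ∈ tl.map Prod.fst,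
          (fun k => (k, lookupD ((a, v) :: tl) k)) k = (fun k => (k, lookupD tl k)) k := by
        intro k hk
        have hne : ¬ a = k := fun he => h.1 (he ▸ hk)
        simp [lookupD, hne]
      rw [List.map_congr_left hco]
      exact ih h.2

-- the extension of an accumulator g by the remaining places
def ext (g : List (Int × List (List (String × Int)))) (places : List (List (String × Int))) :
    List (Int × List (List (String × Int))) :=
  (keysFold (g.map Prod.fst) places).map
    (fun k => (k, lookupD g k ++ places.filter (fun place => stopIdxOf place = k)))

theorem foldl_eq_ext (places : List (List (String × Int))) :
    ∀ g : List (Int × List (List (String × Int))), (g.map Prod.fst).Nodup →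
      places.foldl (fun g place => addPlace g (stopIdxOf place) place) g = ext g places := by
  induction places with
  | nil =>
    intro g hg
    simp only [List.foldl_nil, ext, keysFold, List.foldl_nil, List.filter_nil, List.append_nil]
    exact (reconstruct g hg).symm
  | cons p ps ih =>
    intro g hg
    have hkeys : ((addPlace g (stopIdxOf p) p).map Prod.fst).Nodup := by
      rw [keys_addPlace]
      split
      · exact hg
      · next hm =>
          refine List.Nodup.append hg (by simp) ?_
          intro a ha hb
          simp only [List.mem_singleton] at hb
          subst hb
          exact hm ha
    have step := ih (addPlace g (stopIdxOf p) p) hkeys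
    simp only [List.foldl_cons]
    rw [step]
    -- same key list on both sides
    have hk : keysFold ((addPlace g (stopIdxOf p) p).map Prod.fst) ps
        = keysFold (g.map Prod.fst) (p :: ps) := by
      simp only [keysFold, List.foldl_cons, keys_addPlace]
    -- pointwise equal values
    unfold ext
    rw [hk]
    apply List.map_congr_left
    intro k _
    by_cases hkp : stopIdxOf p = k
    · simp [lookupD_addPlace, hkp, List.append_assoc]
    · simp [lookupD_addPlace, hkp, Ne.symm hkp]

-- ===== VERDICT (by name: the statement is the Claim_ definition above) =====
theorem group_places_by_stop_py_spec : Claim_equal_group_places_by_stop_py := by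
  intro places _ _
  unfold Spec_group_places_by_stop_py group_places_by_stop_py group_places_by_stop_py_alt
  rw [foldl_eq_ext places [] (by simp)]
  simp [ext, keysFold, distinctKeys, lookupD]
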